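-- pv_equiv track=rewrite | github.com/Demomaker/EntreprisesLotbiniere | findNewCompanies.py | getNextCompany
-- ===== SOURCE A (Python) =====
-- def getNextCompany(data, currentIndex):
--     foundElementIndexes = findElementsIndexesInOrder(data, ['+', 'company"'], currentIndex)
--     if foundElementIndexes[0] == -1 or foundElementIndexes[1] == -1 or foundElementIndexes[0] > foundElementIndexes[1]:
--         return [-2, -2, -2]
--     containsReturnCharacterBetween = containsStringBetween(data, foundElementIndexes[0], foundElementIndexes[1], '\n')
--
--     if containsReturnCharacterBetween:
--         maximumDistance = 25
--         if foundElementIndexes[1] - foundElementIndexes[0] > maximumDistance: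
--             return getNextCompany(data, foundElementIndexes[1] - maximumDistance)
--         else :
--             return getNextCompany(data, foundElementIndexes[0] + len('+'))
--
--     return [foundElementIndexes[0], foundElementIndexes[1], currentIndex]
--
-- def containsStringBetween(data, indexOne, indexTwo, input):
--     currentIndex = indexOne
--     foundIt = False
--     while currentIndex != indexTwo :
--         foundIt = True
--         for index in range(len(input)) :
--             if input[index] != data[currentIndex + index]:
--                 foundIt = False
--                 break
--         if foundIt :
--             break
--         currentIndex += 1
--
--     return foundIt
--
-- def findElementsIndexesInOrder(data, arrayOfElementsToFind, startingIndex):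
--     arrayOfElementsIndexes = []
--     searchNextIndex = startingIndex
--     for x in arrayOfElementsToFind:
--         found = data.find(x, searchNextIndex)
--         if found > -1:
--             searchNextIndex = found
--         arrayOfElementsIndexes.append(found)
--     return arrayOfElementsIndexes
-- ===== SOURCE B (Python) =====
-- def getNextCompany(data, currentIndex):
--     idx = currentIndex
--     while True:
--         plus = data.find('+', idx)
--         if plus == -1:
--             return [-2, -2, -2]
--         comp = data.find('company"', plus)
--         if comp == -1:
--             return [-2, -2, -2]
--         if '\n' not in data[plus:comp]:
--             return [plus, comp, idx]
--         idx = comp - 25 if comp - plus > 25 else plus + 1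
-- ===== Notes on version B (the rewrite author's own statement) =====
-- stated objective: simpler
-- what changed: Replaces the helper pipeline (fold building an index list, hand-rolled char-by-char scan with an inner loop) and the tail recursion by a single while loop that calls str.find twice and tests newline membership on a slice.
import Mathlib
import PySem

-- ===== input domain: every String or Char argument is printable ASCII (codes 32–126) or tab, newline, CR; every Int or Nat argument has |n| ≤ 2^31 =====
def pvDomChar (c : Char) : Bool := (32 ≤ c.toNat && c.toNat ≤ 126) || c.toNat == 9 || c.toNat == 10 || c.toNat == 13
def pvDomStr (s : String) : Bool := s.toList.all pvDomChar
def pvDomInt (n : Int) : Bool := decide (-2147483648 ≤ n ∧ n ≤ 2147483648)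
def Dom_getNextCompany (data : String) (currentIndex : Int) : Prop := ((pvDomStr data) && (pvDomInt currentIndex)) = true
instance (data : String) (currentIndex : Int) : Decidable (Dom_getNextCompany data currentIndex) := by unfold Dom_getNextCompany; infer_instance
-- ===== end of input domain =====

-- B replaces A's helper pipeline (fold building an index list, hand-rolled character scan
-- with an inner loop) and its recursion by one while loop with two direct find calls and a
-- substring test on a slice (objective: simpler).
-- Both ports totalize their loop/recursion with a fuel parameter; the wrappers pass
-- data.length + 2 fuel, which exceeds the number of iterations (the effective search start
-- strictly increases and stays ≤ data.length), so the fuel-exhausted branch is unreachable.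

-- ===== PORT A =====

def findElementsIndexesInOrder (data : List Char) (arrayOfElementsToFind : List (List Char))
    (startingIndex : Int) : List Int :=
  (arrayOfElementsToFind.foldl
    (fun (st : List Int × Int) x =>
      let found := PySem.Chars.findFrom data x st.2 none
      let searchNextIndex := if found > -1 then found else st.2
      (st.1 ++ [found], searchNextIndex))
    ([], startingIndex)).1

-- the while loop of containsStringBetween; data[currentIndex + index] is ported with
-- pyGetD: every index reached from getNextCompany is in range.
def containsStringBetweenGo (fuel : Nat) (data input : List Char) (indexTwo currentIndex : Int) : Bool :=
  match fuel with
  | 0 => false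
  | fuel + 1 =>
    if currentIndex = indexTwo then false
    else
      let foundIt := (List.range input.length).all
        (fun index => PySem.List.pyGetD input (index : Int) ' ' == PySem.List.pyGetD data (currentIndex + index) ' ')
      if foundIt then true
      else containsStringBetweenGo fuel data input indexTwo (currentIndex + 1)

def containsStringBetween (data : List Char) (indexOne indexTwo : Int) (input : List Char) : Bool :=
  containsStringBetweenGo (data.length + 1) data input indexTwo indexOne

def getNextCompanyGo (fuel : Nat) (data : List Char) (currentIndex : Int) : List Int :=
  match fuel with
  | 0 => [-2, -2, -2]
  | fuel + 1 =>
    let foundElementIndexes := findElementsIndexesInOrder data [['+'], ['c','o','m','p','a','n','y','"']] currentIndex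
    let f0 := PySem.List.pyGetD foundElementIndexes 0 0
    let f1 := PySem.List.pyGetD foundElementIndexes 1 0
    if f0 = -1 ∨ f1 = -1 ∨ f0 > f1 then [-2, -2, -2]
    else
      let containsReturnCharacterBetween := containsStringBetween data f0 f1 ['\n']
      if containsReturnCharacterBetween then
        if f1 - f0 > 25 then getNextCompanyGo fuel data (f1 - 25)
        else getNextCompanyGo fuel data (f0 + 1)
      else [f0, f1, currentIndex]

def getNextCompany (data : String) (currentIndex : Int) : List Int :=
  getNextCompanyGo (data.toList.length + 2) data.toList currentIndex

-- ===== PORT B =====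

def getNextCompanyAltGo (fuel : Nat) (data : List Char) (idx : Int) : List Int :=
  match fuel with
  | 0 => [-2, -2, -2]
  | fuel + 1 =>
    let plus := PySem.Chars.findFrom data ['+'] idx none
    if plus = -1 then [-2, -2, -2]
    else
      let comp := PySem.Chars.findFrom data ['c','o','m','p','a','n','y','"'] plus none
      if comp = -1 then [-2, -2, -2]
      else if ¬ (PySem.Chars.isIn ['\n'] (PySem.List.slice data (some plus) (some comp)) = true) then
        [plus, comp, idx]
      else getNextCompanyAltGo fuel data (if comp - plus > 25 then comp - 25 else plus + 1)

def getNextCompany_alt (data : String) (currentIndex : Int) : List Int :=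
  getNextCompanyAltGo (data.toList.length + 2) data.toList currentIndex

-- ===== PRECONDITION & SPEC =====
def Spec_getNextCompany (data : String) (currentIndex : Int) (out : List Int) : Prop := out = getNextCompany_alt data currentIndex
instance (data : String) (currentIndex : Int) (out : List Int) : Decidable (Spec_getNextCompany data currentIndex out) := by unfold Spec_getNextCompany; infer_instance

-- ===== CLAIM (what is proved, stated in full; the proofs are below) =====
def Claim_equal_getNextCompany : Prop := ∀ (data : String) (currentIndex : Int), Dom_getNextCompany data currentIndex → Spec_getNextCompany data currentIndex (getNextCompany data currentIndex)

-- ===== LEMMAS AND PROOFS =====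

theorem pvFindFrom_aux (s sub : List Char) (st : Int) (h0 : 0 ≤ st) (hle : st ≤ (s.length : Int))
    (h : PySem.Chars.find (List.drop st.toNat s) sub ≠ -1) :
    0 ≤ PySem.Chars.find (List.drop st.toNat s) sub ∧
    st + PySem.Chars.find (List.drop st.toNat s) sub + sub.length ≤ s.length := by
  have hge := PySem.Chars.neg_one_le_find (List.drop st.toNat s) sub
  have hpre := (PySem.Chars.find_spec (s := List.drop st.toNat s) (sub := sub) (by omega)).1
  have hl := List.IsPrefix.length_le hpre
  have hfl := PySem.Chars.find_le_length (List.drop st.toNat s) sub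
  simp only [List.length_drop] at hl hfl
  omega

-- a successful find lands at or after the (clamped) start and leaves room for the needle
theorem pvFindFrom_bounds (s sub : List Char) (start : Int)
    (h : PySem.Chars.findFrom s sub start none ≠ -1) :
    max start 0 ≤ PySem.Chars.findFrom s sub start none ∧
    PySem.Chars.findFrom s sub start none + sub.length ≤ s.length := by
  simp only [PySem.Chars.findFrom, Int.toNat_natCast, List.take_length] at h ⊢
  split_ifs at h ⊢ <;> try exact absurd rfl h
  all_goals first
    | (have hb := pvFindFrom_aux s sub 0 (by omega) (by omega) (by assumption); omega)
    | (have hb := pvFindFrom_aux s sub (start + ↑s.length) (by omega) (by omega) (by assumption); omega)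
    | (have hb := pvFindFrom_aux s sub start (by omega) (by omega) (by assumption); omega)

theorem pvFEIO_eval (data : List Char) (ci : Int) :
    findElementsIndexesInOrder data [['+'], ['c','o','m','p','a','n','y','"']] ci
    = [PySem.Chars.findFrom data ['+'] ci none,
       PySem.Chars.findFrom data ['c','o','m','p','a','n','y','"']
         (if PySem.Chars.findFrom data ['+'] ci none > -1
          then PySem.Chars.findFrom data ['+'] ci none else ci) none] := rfl

-- 'c in l' as a membership proposition
theorem pvIsIn_singleton (c : Char) (l : List Char) :
    PySem.Chars.isIn [c] l = decide (c ∈ l) := by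
  have hiff := PySem.Chars.isIn_iff_infix (sub := [c]) (s := l)
  rw [List.singleton_infix_iff] at hiff
  by_cases hm : c ∈ l
  · simp [hiff.mpr hm, hm]
  · have : ¬ PySem.Chars.isIn [c] l = true := fun h => hm (hiff.mp h)
    simp [Bool.not_eq_true] at this
    simp [this, hm]

-- A's hand-rolled scan for '\n' between two in-range indices IS the substring test on the slice
theorem pvCsb_eq_isIn (data : List Char) (b : Int) (hble : b ≤ (data.length : Int)) :
    ∀ (fuel : Nat) (a : Int), 0 ≤ a → a ≤ b → (b - a).toNat < fuel →
    containsStringBetweenGo fuel data ['\n'] b a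
      = PySem.Chars.isIn ['\n'] (PySem.List.slice data (some a) (some b)) := by
  intro fuel
  induction fuel with
  | zero => intro a _ _ hf; omega
  | succ n ih =>
    intro a h0 hab hf
    by_cases hab' : a = b
    · rw [containsStringBetweenGo, if_pos hab', pvIsIn_singleton]
      rw [PySem.List.slice_toNat data h0 (by omega)]
      have : b.toNat - a.toNat = 0 := by omega
      simp [this]
    · have hlt : a < b := by omega
      have haN : a.toNat < data.length := by omega
      have hsc : PySem.List.slice data (some a) (some b)
          = data[a.toNat]'haN :: PySem.List.slice data (some (a+1)) (some b) := by
        rw [PySem.List.slice_toNat data h0 (by omega), PySem.List.slice_toNat data (by omega) (by omega),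
          List.drop_eq_getElem_cons haN]
        rw [show (a+1).toNat = a.toNat + 1 by omega,
          show b.toNat - a.toNat = (b.toNat - (a.toNat + 1)) + 1 by omega]
        rw [List.take_succ_cons]
      rw [containsStringBetweenGo, if_neg hab']
      simp only [List.length_cons, List.length_nil, zero_add, List.range_one, List.all_cons,
        List.all_nil, Int.natCast_zero, add_zero, Bool.and_true, PySem.List.pyGetD_zero_cons]
      rw [PySem.List.pyGetD_eq_getElem data ' ' h0 (by omega)]
      by_cases hc : ('\n' : Char) = data[a.toNat]'haN
      · simp only [hc, beq_self_eq_true, if_true]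
        rw [pvIsIn_singleton, hsc]
        simp [← hc]
      · have hbeq : (('\n' : Char) == data[a.toNat]'haN) = false := by
          simp [hc]
        rw [hbeq]
        simp only [Bool.false_eq_true, if_false]
        rw [ih (a+1) (by omega) (by omega) (by omega)]
        rw [pvIsIn_singleton, pvIsIn_singleton, hsc]
        simp [List.mem_cons, hc]

theorem pvGo_eq_altGo (data : List Char) (fuel : Nat) (ci : Int) :
    getNextCompanyGo fuel data ci = getNextCompanyAltGo fuel data ci := by
  induction fuel generalizing ci with
  | zero => rfl
  | succ n ih =>
    rw [getNextCompanyGo, getNextCompanyAltGo]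
    simp only [pvFEIO_eval, PySem.List.pyGetD_ofNat', List.getD_cons_succ, List.getD_cons_zero]
    by_cases h0 : PySem.Chars.findFrom data ['+'] ci none = -1
    · simp [h0]
    · have hb0 := pvFindFrom_bounds data ['+'] ci h0
      simp only [List.length_cons, List.length_nil] at hb0
      rw [if_pos (by omega : PySem.Chars.findFrom data ['+'] ci none > -1)]
      by_cases h1 : PySem.Chars.findFrom data ['c','o','m','p','a','n','y','"']
          (PySem.Chars.findFrom data ['+'] ci none) none = -1
      · simp [h0, h1]
      · have hb1 := pvFindFrom_bounds data ['c','o','m','p','a','n','y','"']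
          (PySem.Chars.findFrom data ['+'] ci none) h1
        simp only [List.length_cons, List.length_nil] at hb1
        rw [if_neg (by omega : ¬ (PySem.Chars.findFrom data ['+'] ci none = -1 ∨
            PySem.Chars.findFrom data ['c','o','m','p','a','n','y','"']
              (PySem.Chars.findFrom data ['+'] ci none) none = -1 ∨
            PySem.Chars.findFrom data ['+'] ci none >
            PySem.Chars.findFrom data ['c','o','m','p','a','n','y','"']
              (PySem.Chars.findFrom data ['+'] ci none) none)),
          if_neg h0, if_neg h1]
        rw [show containsStringBetween data (PySem.Chars.findFrom data ['+'] ci none)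
              (PySem.Chars.findFrom data ['c','o','m','p','a','n','y','"']
                (PySem.Chars.findFrom data ['+'] ci none) none) ['\n']
            = containsStringBetweenGo (data.length + 1) data ['\n']
              (PySem.Chars.findFrom data ['c','o','m','p','a','n','y','"']
                (PySem.Chars.findFrom data ['+'] ci none) none)
              (PySem.Chars.findFrom data ['+'] ci none) from rfl]
        rw [pvCsb_eq_isIn data _ (by omega) (data.length + 1)
          (PySem.Chars.findFrom data ['+'] ci none) (by omega) (by omega) (by omega)]
        by_cases hc : PySem.Chars.isIn ['\n']
            (PySem.List.slice data (some (PySem.Chars.findFrom data ['+'] ci none))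
              (some (PySem.Chars.findFrom data ['c','o','m','p','a','n','y','"']
                (PySem.Chars.findFrom data ['+'] ci none) none))) = true
        · rw [if_pos hc, if_neg (not_not_intro hc)]
          split_ifs with hgap
          · exact ih _
          · exact ih _
        · rw [if_neg hc, if_pos hc]

-- ===== VERDICT (by name: the statement is the Claim_ definition above) =====
theorem getNextCompany_spec : Claim_equal_getNextCompany := by
  intro data ci _
  unfold Spec_getNextCompany getNextCompany getNextCompany_alt
  exact pvGo_eq_altGo data.toList (data.toList.length + 2) ci
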